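-- pv_equiv track=rewrite | github.com/asfjwd/CSE2203 | main.py | mlt3
-- ===== SOURCE A (Python) =====
-- def mlt3(dat):
--   x = [i for i in range(len(dat) + 1)]
--   y = [0]
--   now = 0
--   lastNonZero = -1
--   for d in dat:
--     if d == 0:
--       y.append(now)
--     else :
--       if now:
--         now = 0
--         y.append(now)
--       else:
--         if lastNonZero == -1:
--           now = 1
--         else:
--           now = -1
--         y.append(now)
--         lastNonZero = now
--   return x, y
-- ===== SOURCE B (Python) =====
-- def mlt3(dat):
--     n = len(dat)
--     cnt = [0] * (n + 1)
--     for i, d in enumerate(dat):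
--         cnt[i + 1] = cnt[i] + (1 if d != 0 else 0)
--     y = [0 if c % 2 == 0 else (1 if c % 4 == 1 else -1) for c in cnt]
--     return list(range(n + 1)), y
-- ===== Notes on version B (the rewrite author's own statement) =====
-- stated objective: simpler
-- what changed: Replaces A's single-pass toggling state machine (now + sentinel-overloaded lastNonZero, appending as it goes) by two staged passes: first a prefix-count array of nonzero elements, then a map applying a closed-form mod-4 value to each prefix count.
import Mathlib
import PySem

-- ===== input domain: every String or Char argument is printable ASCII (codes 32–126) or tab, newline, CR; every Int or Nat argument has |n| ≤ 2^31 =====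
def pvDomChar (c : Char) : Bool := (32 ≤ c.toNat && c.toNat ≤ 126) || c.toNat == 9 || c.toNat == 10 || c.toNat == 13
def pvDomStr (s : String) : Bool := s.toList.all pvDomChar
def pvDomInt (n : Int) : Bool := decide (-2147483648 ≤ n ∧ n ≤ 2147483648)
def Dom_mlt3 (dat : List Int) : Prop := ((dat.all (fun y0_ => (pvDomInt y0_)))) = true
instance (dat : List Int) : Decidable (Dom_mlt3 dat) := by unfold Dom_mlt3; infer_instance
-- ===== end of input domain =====

-- B replaces A's one-pass toggling state machine by two staged passes: prefix counts of
-- nonzeros, then a closed-form mod-4 value mapped over them (simpler; same cost).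

-- ===== PORT A =====
-- step of A's loop; state = (y, now, lastNonZero)
def mlt3Step (s : List Int × Int × Int) (d : Int) : List Int × Int × Int :=
  let (y, now, last) := s
  if d = 0 then (y ++ [now], now, last)
  else if now ≠ 0 then (y ++ [(0 : Int)], 0, last)
  else
    let now' : Int := if last = -1 then 1 else -1
    (y ++ [now'], now', now')

def mlt3 (dat : List Int) : List Int × List Int :=
  let x := PySem.List.pyRange 0 ((dat.length : Int) + 1) 1
  let (y, _, _) := dat.foldl mlt3Step ([0], 0, -1)
  (x, y)

-- ===== PORT B =====
-- the prefix-count entries cnt[1..n] (cnt[i+1] = cnt[i] + (1 if d != 0 else 0))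
def mlt3AltCnts : List Int → Int → List Int
  | [], _ => []
  | d :: tl, c =>
    let c' := c + (if d ≠ 0 then 1 else 0)
    c' :: mlt3AltCnts tl c'

-- the comprehension's body: 0 if c%2==0 else (1 if c%4==1 else -1)
def mlt3AltVal (c : Int) : Int :=
  if PySem.Int.mod c 2 = 0 then 0 else if PySem.Int.mod c 4 = 1 then 1 else -1

def mlt3_alt (dat : List Int) : List Int × List Int :=
  let cnt := 0 :: mlt3AltCnts dat 0
  (PySem.List.pyRange 0 ((dat.length : Int) + 1) 1, cnt.map mlt3AltVal)

-- ===== PRECONDITION & SPEC =====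
def Spec_mlt3 (dat : List Int) (out : List Int × List Int) : Prop := out = mlt3_alt dat
instance (dat : List Int) (out : List Int × List Int) : Decidable (Spec_mlt3 dat out) := by unfold Spec_mlt3; infer_instance

-- ===== CLAIM (what is proved, stated in full; the proofs are below) =====
def Claim_equal_mlt3 : Prop := ∀ (dat : List Int), Dom_mlt3 dat → Spec_mlt3 dat (mlt3 dat)

-- ===== LEMMAS AND PROOFS =====

-- A's `now` as a function of the nonzero count
def nowOf (cnt : Int) : Int := if cnt % 2 = 0 then 0 else if cnt % 4 = 1 then 1 else -1
-- A's `lastNonZero` as a function of the nonzero count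
def lastOf (cnt : Int) : Int := if cnt % 4 = 1 ∨ cnt % 4 = 2 then 1 else -1
-- the nonzero count after the whole list
def cntEnd : List Int → Int → Int
  | [], c => c
  | d :: tl, c => cntEnd tl (c + if d ≠ 0 then 1 else 0)

lemma val_eq_nowOf (c : Int) (_h : 0 ≤ c) : mlt3AltVal c = nowOf c := by
  have h2 : PySem.Int.mod c 2 = c % 2 := PySem.Int.mod_eq_emod_of_pos (by norm_num)
  have h4 : PySem.Int.mod c 4 = c % 4 := PySem.Int.mod_eq_emod_of_pos (by norm_num)
  simp only [mlt3AltVal, nowOf, h2, h4]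

lemma step_sim (d : Int) (y : List Int) (cnt : Int) (h : 0 ≤ cnt) :
    mlt3Step (y, nowOf cnt, lastOf cnt) d =
      (y ++ [mlt3AltVal (cnt + if d ≠ 0 then 1 else 0)],
       nowOf (cnt + if d ≠ 0 then 1 else 0), lastOf (cnt + if d ≠ 0 then 1 else 0)) := by
  by_cases hd : d = 0
  · simp [mlt3Step, hd, val_eq_nowOf _ h]
  · rw [val_eq_nowOf _ (by omega)]
    have hm : cnt % 4 = 0 ∨ cnt % 4 = 1 ∨ cnt % 4 = 2 ∨ cnt % 4 = 3 := by omega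
    rcases hm with hc | hc | hc | hc
    · simp [mlt3Step, hd, nowOf, lastOf, hc, (by omega : cnt % 2 = 0),
        (by omega : (cnt + 1) % 2 = 1), (by omega : (cnt + 1) % 4 = 1)]
    · simp [mlt3Step, hd, nowOf, lastOf, hc, (by omega : cnt % 2 = 1),
        (by omega : (cnt + 1) % 2 = 0), (by omega : (cnt + 1) % 4 = 2)]
    · simp [mlt3Step, hd, nowOf, lastOf, hc, (by omega : cnt % 2 = 0),
        (by omega : (cnt + 1) % 2 = 1), (by omega : (cnt + 1) % 4 = 3)]
    · simp [mlt3Step, hd, nowOf, lastOf, hc, (by omega : cnt % 2 = 1),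
        (by omega : (cnt + 1) % 2 = 0), (by omega : (cnt + 1) % 4 = 0)]

lemma fold_sim (dat : List Int) : ∀ (y : List Int) (cnt : Int), 0 ≤ cnt →
    dat.foldl mlt3Step (y, nowOf cnt, lastOf cnt) =
      (y ++ (mlt3AltCnts dat cnt).map mlt3AltVal, nowOf (cntEnd dat cnt), lastOf (cntEnd dat cnt)) := by
  induction dat with
  | nil => intro y cnt h; simp [mlt3AltCnts, cntEnd]
  | cons d tl ih =>
    intro y cnt h
    simp only [List.foldl_cons]
    rw [step_sim d y cnt h]
    rw [ih _ _ (by split <;> omega)]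
    simp [mlt3AltCnts, cntEnd]

theorem mlt3_eq_alt (dat : List Int) : mlt3 dat = mlt3_alt dat := by
  simp only [mlt3, mlt3_alt]
  have h := fold_sim dat [0] 0 (by norm_num)
  rw [(by decide : nowOf 0 = 0), (by decide : lastOf 0 = -1)] at h
  rw [h]
  simp [val_eq_nowOf 0 le_rfl, (by decide : nowOf 0 = 0)]

-- ===== VERDICT (by name: the statement is the Claim_ definition above) =====
theorem mlt3_spec : Claim_equal_mlt3 := by
  intro dat _
  unfold Spec_mlt3
  exact mlt3_eq_alt dat
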